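-- pv_equiv track=rewrite | github.com/Bobberson3108/Septago | septago/engine.py | seven_in_a_row
-- ===== SOURCE A (Python) =====
-- def seven_in_a_row(row):
--     count = 1
--     prev = row[0]
--     for x in row[1:]:
--         if x==prev:
--             count += 1
--             if count == 7:
--                 return x
--         else:
--             count = 1
--         prev = x
--     return 0
-- ===== SOURCE B (Python) =====
-- def _rle(row):
--     # run-length encode the row into (value, run_length) pairs
--     if not row:
--         return []
--     out = []
--     v, c = row[0], 1
--     for x in row[1:]:
--         if x == v:
--             c += 1
--         else:
--             out.append((v, c))
--             v, c = x, 1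
--     out.append((v, c))
--     return out
--
-- def seven_in_a_row(row):
--     for v, c in _rle(row):
--         if c >= 7:
--             return v
--     return 0
-- ===== Notes on version B (the rewrite author's own statement) =====
-- stated objective: alternative
-- what changed: B run-length encodes the row into maximal (value,length) runs in one pass and then returns the value of the first run of length >= 7, instead of A's single-pass counter with an early return at count == 7.
import Mathlib
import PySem

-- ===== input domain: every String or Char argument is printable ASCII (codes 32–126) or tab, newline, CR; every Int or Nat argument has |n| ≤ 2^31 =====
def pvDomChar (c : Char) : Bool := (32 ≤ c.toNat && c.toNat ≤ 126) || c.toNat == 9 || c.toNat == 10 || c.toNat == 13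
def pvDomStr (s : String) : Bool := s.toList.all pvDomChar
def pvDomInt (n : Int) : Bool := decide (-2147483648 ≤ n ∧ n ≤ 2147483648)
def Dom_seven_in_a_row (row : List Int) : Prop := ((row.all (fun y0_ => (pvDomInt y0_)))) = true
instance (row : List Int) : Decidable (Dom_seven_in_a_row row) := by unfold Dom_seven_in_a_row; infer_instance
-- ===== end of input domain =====

-- B replaces A's running counter with a run-length encoding pass followed by a scan
-- for the first run of length ≥ 7 (alternative decomposition; return value only).

-- ===== PORT A =====
-- A's for-loop over row[1:], carrying (prev, count); returning x the moment count hits 7.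
def sevenLoopA (prev : Int) (count : Int) : List Int → Int
  | [] => 0
  | x :: xs =>
    if x = prev then
      if count + 1 = 7 then x else sevenLoopA x (count + 1) xs
    else
      sevenLoopA x 1 xs

def seven_in_a_row (row : List Int) : Int :=
  match row with
  | [] => 0          -- A raises IndexError here (row[0]); excluded by Pre_
  | h :: t => sevenLoopA h 1 t

-- ===== PORT B =====
-- B's _rle loop: accumulator (v, c), emitting a run when the value changes, final run at the end.
def rleB (v : Int) (c : Int) : List Int → List (Int × Int)
  | [] => [(v, c)]
  | x :: xs => if x = v then rleB v (c + 1) xs else (v, c) :: rleB x 1 xs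

-- B's second loop: first run with length ≥ 7, else 0.
def scanRunsB : List (Int × Int) → Int
  | [] => 0
  | (v, c) :: rs => if c ≥ 7 then v else scanRunsB rs

def seven_in_a_row_alt (row : List Int) : Int :=
  match row with
  | [] => scanRunsB []        -- _rle returns [] for the empty row
  | h :: t => scanRunsB (rleB h 1 t)

-- ===== PRECONDITION & SPEC =====
-- Pre_ excludes only the empty row, on which A raises IndexError at row[0].
def Pre_seven_in_a_row (row : List Int) : Prop := row ≠ []
instance (row : List Int) : Decidable (Pre_seven_in_a_row row) := by unfold Pre_seven_in_a_row; infer_instance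
def pvWitness_seven_in_a_row : List Int := [1, 1, 2]

def Spec_seven_in_a_row (row : List Int) (out : Int) : Prop := out = seven_in_a_row_alt row
instance (row : List Int) (out : Int) : Decidable (Spec_seven_in_a_row row out) := by unfold Spec_seven_in_a_row; infer_instance

-- ===== CLAIM (what is proved, stated in full; the proofs are below) =====
def Claim_equal_seven_in_a_row : Prop := ∀ (row : List Int), Dom_seven_in_a_row row → Pre_seven_in_a_row row → Spec_seven_in_a_row row (seven_in_a_row row)

-- ===== LEMMAS AND PROOFS =====

-- If the leading run already has count ≥ 7, the scan returns its value.
theorem scan_rle_big (xs : List Int) : ∀ (v c : Int), 7 ≤ c → scanRunsB (rleB v c xs) = v := by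
  induction xs with
  | nil => intro v c h; simp [rleB, scanRunsB, h]
  | cons x xs ih =>
    intro v c h
    by_cases hx : x = v
    · simp [rleB, hx]; exact ih v (c + 1) (by omega)
    · simp [rleB, hx, scanRunsB, h]

-- Main invariant: A's counter loop equals B's rle-then-scan, for 1 ≤ count ≤ 6.
theorem loop_eq (xs : List Int) : ∀ (v c : Int), 1 ≤ c → c ≤ 6 →
    sevenLoopA v c xs = scanRunsB (rleB v c xs) := by
  induction xs with
  | nil => intro v c h1 h6; simp [sevenLoopA, rleB, scanRunsB]; omega
  | cons x xs ih =>
    intro v c h1 h6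
    by_cases hx : x = v
    · by_cases h7 : c + 1 = 7
      · subst hx
        simp [sevenLoopA, rleB, h7]
        exact (scan_rle_big xs x 7 (by omega)).symm
      · simp [sevenLoopA, rleB, hx, h7]
        exact ih v (c + 1) (by omega) (by omega)
    · have : ¬ (7 : Int) ≤ c := by omega
      simp [sevenLoopA, rleB, hx, scanRunsB, this]
      exact ih x 1 (by omega) (by omega)

-- ===== VERDICT (by name: the statement is the Claim_ definition above) =====
theorem seven_in_a_row_spec : Claim_equal_seven_in_a_row := by
  intro row _ hpre
  match row with
  | [] => exact absurd rfl hpre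
  | h :: t =>
    unfold Spec_seven_in_a_row seven_in_a_row seven_in_a_row_alt
    exact loop_eq t h 1 (by omega) (by omega)
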